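-- pv_equiv track=rewrite | github.com/wajahatah/hand_in_pocket | Data_Annotation/utils_module/calculations.py | elbow_sequence_calculation
-- ===== SOURCE A (Python) =====
-- def elbow_sequence_calculation(buffer, hand_id):
--
--     front_value = None
--     back_value = None
--
--     if len(buffer) > 1:  # Check if the list has more than 1 element
--         # Find the first value greater than 0 from the front
--         for i in range(len(buffer)):
--             if buffer[i] > 0:
--                 front_value = buffer[i]
--                 break
--
--         # Find the first value greater than 0 from the back
--         for i in range(len(buffer)-1, -1, -1):
--             if buffer[i] > 0:
--                 back_value = buffer[i]
--                 break
--
--         # Calculate the difference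
--         if front_value and back_value:
--             movement = back_value - front_value
--
--             if hand_id == 1:
--                 return round(movement)
--
--             if hand_id == 0:
--                 return -round(movement)
--         else:
--             return 0
--
--     else:
--         return 0
-- ===== SOURCE B (Python) =====
-- def elbow_sequence_calculation(buffer, hand_id):
--     if len(buffer) <= 1:
--         return 0
--     positives = [x for x in buffer if x > 0]
--     if not positives:
--         return 0
--     movement = positives[-1] - positives[0]
--     return movement if hand_id == 1 else -movement
-- ===== Notes on version B (the rewrite author's own statement) =====
-- stated objective: simpler
-- what changed: Replaces the two directional early-exit index scans with a single collecting pass (filter of positives) and end indexing, folding the value/guard logic into one expression.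
-- outside the precondition, e.g. on elbow_sequence_calculation([1, 2], 5): A returns None, B returns -1
import Mathlib
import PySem

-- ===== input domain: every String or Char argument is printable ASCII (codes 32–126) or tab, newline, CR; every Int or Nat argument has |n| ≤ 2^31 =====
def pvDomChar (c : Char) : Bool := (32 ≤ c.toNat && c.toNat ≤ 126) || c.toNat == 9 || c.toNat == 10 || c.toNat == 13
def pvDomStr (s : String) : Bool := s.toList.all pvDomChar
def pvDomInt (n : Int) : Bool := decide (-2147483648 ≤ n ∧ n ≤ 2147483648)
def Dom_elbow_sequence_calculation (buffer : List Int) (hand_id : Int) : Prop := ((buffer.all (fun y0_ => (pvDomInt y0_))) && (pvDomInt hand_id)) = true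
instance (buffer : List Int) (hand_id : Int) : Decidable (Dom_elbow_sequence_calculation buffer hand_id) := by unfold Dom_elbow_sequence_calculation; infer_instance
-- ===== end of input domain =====

-- B replaces A's two directional early-exit scans with one collecting pass (filter of positives)
-- plus end indexing; objective: simpler. Pre_ excludes hand_id ∉ {0,1} when a positive exists and
-- len(buffer) > 1, where A falls through and returns None (not an int).


-- ===== PORT A =====
-- the front loop: scan indices from the front, stop at the first element > 0
def pvFrontScan : List Int → Option Int
  | [] => none
  | x :: xs => if x > 0 then some x else pvFrontScan xs

-- the back loop: scan indices from len-1 down to 0 = scan the reversed list from the front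
def pvBackScan (l : List Int) : Option Int := pvFrontScan l.reverse

-- round(movement) on an int is the int itself (Python round of int is exact)
def elbow_sequence_calculation (buffer : List Int) (hand_id : Int) : Int :=
  if buffer.length > 1 then
    match pvFrontScan buffer, pvBackScan buffer with
    | some front_value, some back_value =>
      let movement := back_value - front_value
      if hand_id = 1 then movement
      else if hand_id = 0 then -movement
      else 0  -- Python returns None here; excluded by Pre_
    | _, _ => 0
  else 0

-- ===== PORT B =====
def elbow_sequence_calculation_alt (buffer : List Int) (hand_id : Int) : Int :=
  if buffer.length ≤ 1 then 0
  else
    match buffer.filter (fun x => decide (x > 0)) with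
    | [] => 0
    | p :: ps =>
      let movement := (p :: ps).getLast (List.cons_ne_nil p ps) - p
      if hand_id = 1 then movement else -movement

-- ===== PRECONDITION & SPEC =====
-- Pre_ excludes exactly the inputs where A returns None instead of an int:
-- len(buffer) > 1, some element is positive, and hand_id is neither 0 nor 1.
def Pre_elbow_sequence_calculation (buffer : List Int) (hand_id : Int) : Prop :=
  hand_id = 0 ∨ hand_id = 1 ∨ buffer.length ≤ 1 ∨ ∀ x ∈ buffer, x ≤ 0
instance (buffer : List Int) (hand_id : Int) : Decidable (Pre_elbow_sequence_calculation buffer hand_id) := by unfold Pre_elbow_sequence_calculation; infer_instance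
def pvWitness_elbow_sequence_calculation : List Int × Int := ([0, 2, 5, -1, 3, 0], 1)
def Spec_elbow_sequence_calculation (buffer : List Int) (hand_id : Int) (out : Int) : Prop := out = elbow_sequence_calculation_alt buffer hand_id
instance (buffer : List Int) (hand_id : Int) (out : Int) : Decidable (Spec_elbow_sequence_calculation buffer hand_id out) := by unfold Spec_elbow_sequence_calculation; infer_instance

-- ===== CLAIM (what is proved, stated in full; the proofs are below) =====
def Claim_equal_elbow_sequence_calculation : Prop := ∀ (buffer : List Int) (hand_id : Int), Dom_elbow_sequence_calculation buffer hand_id → Pre_elbow_sequence_calculation buffer hand_id → Spec_elbow_sequence_calculation buffer hand_id (elbow_sequence_calculation buffer hand_id)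

-- ===== LEMMAS AND PROOFS =====
theorem pvFrontScan_eq (l : List Int) : pvFrontScan l = (l.filter (fun x => decide (x > 0))).head? := by
  induction l with
  | nil => rfl
  | cons x xs ih =>
    by_cases h : x > 0 <;> simp [pvFrontScan, h, ih]

theorem pvBackScan_eq (l : List Int) : pvBackScan l = (l.filter (fun x => decide (x > 0))).getLast? := by
  rw [pvBackScan, pvFrontScan_eq, List.filter_reverse, List.head?_reverse]

-- ===== VERDICT (by name: the statement is the Claim_ definition above) =====
theorem elbow_sequence_calculation_spec : Claim_equal_elbow_sequence_calculation := by
  intro buffer hand_id _ hpre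
  unfold Spec_elbow_sequence_calculation elbow_sequence_calculation elbow_sequence_calculation_alt
  by_cases hlen : buffer.length > 1
  · simp only [hlen, if_true]
    have hlen' : ¬ buffer.length ≤ 1 := by omega
    simp only [hlen', if_false]
    rw [pvFrontScan_eq, pvBackScan_eq]
    cases hfil : buffer.filter (fun x => decide (x > 0)) with
    | nil => simp
    | cons p ps =>
      simp only [List.head?_cons, List.getLast?_eq_some_getLast (List.cons_ne_nil p ps)]
      have hid : hand_id = 0 ∨ hand_id = 1 := by
        rcases hpre with h | h | h | h
        · exact Or.inl h
        · exact Or.inr h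
        · omega
        · exfalso
          have hp : p ∈ buffer.filter (fun x => decide (x > 0)) := by
            rw [hfil]; exact List.mem_cons_self
          have := List.of_mem_filter hp
          have hmem := List.mem_of_mem_filter hp
          have := h p hmem
          simp at *; omega
      rcases hid with h | h <;> simp [h]
  · have hlen' : buffer.length ≤ 1 := by omega
    simp [hlen, hlen']
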